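-- pv_equiv track=rewrite | github.com/ianepjeong/cher_tweets | network.py | network_dict
-- ===== SOURCE A (Python) =====
-- def network_dict(train_set):
--     '''
--     For each word in our training data, find every word that follows
--     the word and the count for the trailing word.
--
--     Input:
--     train_set: list of lists of strings
--
--     Returns: dictionary of dictionaries
--     '''
--     network = {}
--
--     for lst in train_set:
--         for i, word in enumerate(lst):
--             network[word] = network.get(word, {})
--             if len(lst) - i > 1:
--                 next_word = lst[i + 1]
--                 network[word][next_word] = network[word].get(next_word, 0) + 1
--     return network
-- ===== SOURCE B (Python) =====
-- def network_dict(train_set):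
--     # Flatten into a global word stream and bigram stream, tally all bigrams
--     # in one flat counter, then assemble the nested dict in a final pass.
--     words = [w for lst in train_set for w in lst]
--     pairs = [p for lst in train_set for p in zip(lst, lst[1:])]
--     counts = {}
--     for p in pairs:
--         counts[p] = counts.get(p, 0) + 1
--     network = {w: {} for w in words}
--     for a, b in counts:
--         network[a][b] = counts[(a, b)]
--     return network
-- ===== Notes on version B (the rewrite author's own statement) =====
-- stated objective: alternative
-- what changed: Replaces A's incremental per-word nested-dict updates by a batch pipeline: flatten the training set into a global word stream and bigram stream, tally all bigrams in one flat Counter-style dict keyed by the pair, then assemble the nested dict in a final pass over the distinct pairs.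
import Mathlib
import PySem

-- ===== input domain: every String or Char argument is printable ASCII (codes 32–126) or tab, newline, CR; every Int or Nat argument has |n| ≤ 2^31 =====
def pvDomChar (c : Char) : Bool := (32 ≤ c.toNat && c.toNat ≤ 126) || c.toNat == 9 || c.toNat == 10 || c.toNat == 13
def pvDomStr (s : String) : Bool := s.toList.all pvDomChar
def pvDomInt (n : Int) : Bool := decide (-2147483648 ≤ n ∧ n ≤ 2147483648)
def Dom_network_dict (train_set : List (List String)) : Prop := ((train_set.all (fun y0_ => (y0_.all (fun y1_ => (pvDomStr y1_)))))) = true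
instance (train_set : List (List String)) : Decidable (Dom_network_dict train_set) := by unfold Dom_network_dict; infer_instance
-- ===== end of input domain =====

-- B replaces A's incremental per-word nested-dict updates by a batch pipeline: flatten into
-- global word and bigram streams, tally bigrams in one flat counter keyed by the pair, then
-- assemble the nested dict in a final pass over the distinct pairs (alternative decomposition).

-- ===== PORT A =====
-- literal transliteration of A: one enumerate pass; the guard len(lst)-i>1 makes lst[i+1]
-- in range, so the unreachable `none` branch of pyGet? leaves the state unchanged
def network_dict (train_set : List (List String)) : List (String × List (String × Int)) :=
  let network : PySem.Dict String (PySem.Dict String Int) :=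
    train_set.foldl (fun network lst =>
      (PySem.List.enumerate lst).foldl (fun network iw =>
        let i := iw.1
        let word := iw.2
        let network := network.insert word (network.getD word PySem.Dict.empty)
        if (lst.length : Int) - i > 1 then
          match PySem.List.pyGet? lst (i + 1) with
          | some next_word =>
              network.insert word ((network.getD word PySem.Dict.empty).insert next_word
                ((network.getD word PySem.Dict.empty).getD next_word 0 + 1))
          | none => network
        else network) network) PySem.Dict.empty
  network.items.map (fun p => (p.1, p.2.items))

-- ===== PORT B =====
-- literal transliteration of Source B; `counts[(a, b)]` is ported as getD _ 0 — exact because the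
-- loop iterates over counts' own keys, so the KeyError branch is unreachable
def network_dict_alt (train_set : List (List String)) : List (String × List (String × Int)) :=
  let words : List String := train_set.flatMap (fun lst => lst)
  let pairs : List (String × String) :=
    train_set.flatMap (fun lst => lst.zip (PySem.List.slice lst (some 1) none))
  let counts : PySem.Dict (String × String) Int :=
    pairs.foldl (fun c p => c.insert p (c.getD p 0 + 1)) PySem.Dict.empty
  let network : PySem.Dict String (PySem.Dict String Int) :=
    words.foldl (fun n w => n.insert w PySem.Dict.empty) PySem.Dict.empty
  let network :=
    counts.keys.foldl (fun n ab =>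
      n.insert ab.1 ((n.getD ab.1 PySem.Dict.empty).insert ab.2 (counts.getD ab 0))) network
  network.items.map (fun p => (p.1, p.2.items))

-- ===== PRECONDITION & SPEC =====
def Spec_network_dict (train_set : List (List String)) (out : List (String × List (String × Int))) : Prop := out = network_dict_alt train_set
instance (train_set : List (List String)) (out : List (String × List (String × Int))) : Decidable (Spec_network_dict train_set out) := by unfold Spec_network_dict; infer_instance

-- ===== CLAIM (what is proved, stated in full; the proofs are below) =====
def Claim_equal_network_dict : Prop := ∀ (train_set : List (List String)), Dom_network_dict train_set → Spec_network_dict train_set (network_dict train_set)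

-- ===== LEMMAS AND PROOFS =====

/-- registration step, as A writes it: `network[word] = network.get(word, {})` -/
def pvReg (n : PySem.Dict String (PySem.Dict String Int)) (w : String) :
    PySem.Dict String (PySem.Dict String Int) :=
  n.insert w (n.getD w PySem.Dict.empty)

/-- counting step: `network[a][b] = network[a].get(b, 0) + 1` -/
def pvInc (n : PySem.Dict String (PySem.Dict String Int)) (a b : String) :
    PySem.Dict String (PySem.Dict String Int) :=
  n.insert a ((n.getD a PySem.Dict.empty).insert b
    ((n.getD a PySem.Dict.empty).getD b 0 + 1))

/-- grouped step: set b's tally under a to c outright -/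
def pvSet (n : PySem.Dict String (PySem.Dict String Int)) (p : String × String) (c : Int) :
    PySem.Dict String (PySem.Dict String Int) :=
  n.insert p.1 ((n.getD p.1 PySem.Dict.empty).insert p.2 c)

/-- A's per-list pass, written as structural recursion on the list -/
def pvSteps (n : PySem.Dict String (PySem.Dict String Int)) :
    List String → PySem.Dict String (PySem.Dict String Int)
  | [] => n
  | [w] => pvReg n w
  | a :: b :: r => pvSteps (pvInc (pvReg n a) a b) (b :: r)

/-- the body of A's enumerate loop, parametric in the list it indexes into -/
def pvBody (lst : List String) (network : PySem.Dict String (PySem.Dict String Int))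
    (iw : Int × String) : PySem.Dict String (PySem.Dict String Int) :=
  let i := iw.1
  let word := iw.2
  let network := network.insert word (network.getD word PySem.Dict.empty)
  if (lst.length : Int) - i > 1 then
    match PySem.List.pyGet? lst (i + 1) with
    | some next_word =>
        network.insert word ((network.getD word PySem.Dict.empty).insert next_word
          ((network.getD word PySem.Dict.empty).getD next_word 0 + 1))
    | none => network
  else network

theorem pvReg_of_contains (n : PySem.Dict String (PySem.Dict String Int)) (w : String)
    (hnd : n.keys.Nodup) (hc : n.contains w = true) : pvReg n w = n := by
  apply PySem.Dict.ext
  rw [pvReg, PySem.Dict.items_insert_of_contains _ _ hc]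
  refine (List.map_congr_left ?_).trans (List.map_id _)
  intro p hp
  by_cases hk : p.1 = w
  · have hmem : (w, p.2) ∈ n.items := by rw [← hk]; simpa using hp
    have hv : n.getD w PySem.Dict.empty = p.2 :=
      PySem.Dict.getD_of_mem_items _ hmem hnd _
    rw [← hk] at hv ⊢
    simp [hv]
  · simp [hk]

theorem pvNodup_reg (n : PySem.Dict String (PySem.Dict String Int)) (w : String)
    (hnd : n.keys.Nodup) : (pvReg n w).keys.Nodup :=
  PySem.Dict.nodup_keys_insert _ _ _ hnd

theorem pvNodup_inc (n : PySem.Dict String (PySem.Dict String Int)) (a b : String)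
    (hnd : n.keys.Nodup) : (pvInc n a b).keys.Nodup :=
  PySem.Dict.nodup_keys_insert _ _ _ hnd

theorem pvContains_reg (n : PySem.Dict String (PySem.Dict String Int)) (w a : String)
    (hc : n.contains a = true) : (pvReg n w).contains a = true := by
  rw [pvReg, PySem.Dict.contains_insert]; simp [hc]

theorem pvContains_inc (n : PySem.Dict String (PySem.Dict String Int)) (a b w : String)
    (hc : n.contains w = true) : (pvInc n a b).contains w = true := by
  rw [pvInc, PySem.Dict.contains_insert]; simp [hc]

/-- registration commutes with a count at an already-present key -/
theorem pvReg_inc_comm (n : PySem.Dict String (PySem.Dict String Int)) (a b w : String)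
    (hnd : n.keys.Nodup) (hc : n.contains a = true) :
    pvReg (pvInc n a b) w = pvInc (pvReg n w) a b := by
  by_cases hw : w = a
  · subst hw
    rw [pvReg_of_contains n w hnd hc, pvReg_of_contains]
    · exact pvNodup_inc n w b hnd
    · exact PySem.Dict.contains_insert_self _ _ _
  · have hwa : w ≠ a := hw
    simp only [pvReg, pvInc,
      PySem.Dict.getD_insert_of_ne _ _ _ hwa,
      PySem.Dict.getD_insert_of_ne _ _ _ (Ne.symm hwa)]
    apply PySem.Dict.ext
    by_cases hwc : n.contains w = true
    · have h1 : (PySem.Dict.insert n a ((n.getD a PySem.Dict.empty).insert b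
          ((n.getD a PySem.Dict.empty).getD b 0 + 1))).contains w = true := by
        rw [PySem.Dict.contains_insert]; simp [hwc]
      have h2 : (PySem.Dict.insert n w (n.getD w PySem.Dict.empty)).contains a = true := by
        rw [PySem.Dict.contains_insert]; simp [hc]
      rw [PySem.Dict.items_insert_of_contains _ _ h1,
        PySem.Dict.items_insert_of_contains _ _ hc,
        PySem.Dict.items_insert_of_contains _ _ h2,
        PySem.Dict.items_insert_of_contains _ _ hwc,
        List.map_map, List.map_map]
      apply List.map_congr_left
      intro p _
      by_cases hpa : p.1 = a
      · simp [Function.comp, hpa, Ne.symm hwa]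
      · by_cases hpw : p.1 = w
        · simp [Function.comp, hpw, hwa]
        · simp [Function.comp, hpa, hpw]
    · have hwc' : n.contains w = false := by simpa using hwc
      have h1 : (PySem.Dict.insert n a ((n.getD a PySem.Dict.empty).insert b
          ((n.getD a PySem.Dict.empty).getD b 0 + 1))).contains w = false := by
        rw [PySem.Dict.contains_insert]; simp [hwc', hwa]
      have h2 : (PySem.Dict.insert n w (n.getD w PySem.Dict.empty)).contains a = true := by
        rw [PySem.Dict.contains_insert]; simp [hc]
      rw [PySem.Dict.items_insert_of_not_contains _ _ h1,
        PySem.Dict.items_insert_of_contains _ _ hc,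
        PySem.Dict.items_insert_of_contains _ _ h2,
        PySem.Dict.items_insert_of_not_contains _ _ hwc',
        List.map_append]
      simp [hwa]

/-- a count at a present key commutes over a whole registration pass -/
theorem pvRegFold_inc_comm (ws : List String) (n : PySem.Dict String (PySem.Dict String Int))
    (a b : String) (hnd : n.keys.Nodup) (hc : n.contains a = true) :
    ws.foldl pvReg (pvInc n a b) = pvInc (ws.foldl pvReg n) a b := by
  induction ws generalizing n with
  | nil => rfl
  | cons w ws ih =>
    simp only [List.foldl_cons]
    rw [pvReg_inc_comm n a b w hnd hc]
    exact ih (pvReg n w) (pvNodup_reg n w hnd) (pvContains_reg n w a hc)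

theorem pvNodup_regFold (ws : List String) (n : PySem.Dict String (PySem.Dict String Int))
    (hnd : n.keys.Nodup) : (ws.foldl pvReg n).keys.Nodup := by
  induction ws generalizing n with
  | nil => exact hnd
  | cons w ws ih => exact ih (pvReg n w) (pvNodup_reg n w hnd)

theorem pvContains_regFold (ws : List String) (n : PySem.Dict String (PySem.Dict String Int))
    (a : String) (h : a ∈ ws ∨ n.contains a = true) :
    (ws.foldl pvReg n).contains a = true := by
  induction ws generalizing n with
  | nil => exact h.resolve_left (by simp)
  | cons w ws ih =>
    simp only [List.foldl_cons]
    rcases h with h | h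
    · rcases List.mem_cons.mp h with h | h
      · subst h
        exact ih _ (Or.inr (by rw [pvReg]; exact PySem.Dict.contains_insert_self _ _ _))
      · exact ih _ (Or.inl h)
    · exact ih _ (Or.inr (pvContains_reg n w a h))

theorem pvNodup_steps (lst : List String) (n : PySem.Dict String (PySem.Dict String Int))
    (hnd : n.keys.Nodup) : (pvSteps n lst).keys.Nodup := by
  induction lst generalizing n with
  | nil => exact hnd
  | cons a t ih =>
    cases t with
    | nil => exact pvNodup_reg n a hnd
    | cons b r => exact ih (pvInc (pvReg n a) a b) (pvNodup_inc _ a b (pvNodup_reg n a hnd))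

/-- uncurried counting step -/
def pvIncP (n : PySem.Dict String (PySem.Dict String Int)) (q : String × String) :
    PySem.Dict String (PySem.Dict String Int) :=
  pvInc n q.1 q.2

/-- A's per-list pass equals: register the whole list, then count its adjacent pairs -/
theorem pvSteps_eq (lst : List String) (n : PySem.Dict String (PySem.Dict String Int))
    (hnd : n.keys.Nodup) :
    (lst.zip lst.tail).foldl pvIncP (lst.foldl pvReg n) = pvSteps n lst := by
  induction lst generalizing n with
  | nil => rfl
  | cons a t ih =>
    cases t with
    | nil => simp [pvSteps]
    | cons b r =>
      have hca : (pvReg n a).contains a = true := PySem.Dict.contains_insert_self _ _ _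
      have hnda := pvNodup_reg n a hnd
      have hcomm := pvRegFold_inc_comm (b :: r) (pvReg n a) a b hnda hca
      have ih' := ih (pvInc (pvReg n a) a b) (pvNodup_inc _ a b hnda)
      simp only [List.tail_cons] at ih'
      simp only [List.tail_cons, List.zip_cons_cons, List.foldl_cons]
      show ((b :: r).zip r).foldl pvIncP
          (pvIncP ((b :: r).foldl pvReg (pvReg n a)) (a, b)) = pvSteps n (a :: b :: r)
      rw [pvIncP, ← hcomm, ih']
      rfl

/-- a block of counting steps at present keys commutes over a registration pass -/
theorem pvIncFold_regFold_comm (P : List (String × String)) (ws : List String)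
    (n : PySem.Dict String (PySem.Dict String Int)) (hnd : n.keys.Nodup)
    (hc : ∀ q ∈ P, n.contains q.1 = true) :
    ws.foldl pvReg (P.foldl pvIncP n) = P.foldl pvIncP (ws.foldl pvReg n) := by
  induction P generalizing n with
  | nil => rfl
  | cons q P ih =>
    simp only [List.foldl_cons]
    rw [ih (pvIncP n q) (pvNodup_inc _ _ _ hnd)
      (fun r hr => pvContains_inc n q.1 q.2 r.1 (hc r (List.mem_cons_of_mem q hr))),
      pvIncP, pvRegFold_inc_comm ws n q.1 q.2 hnd (hc q List.mem_cons_self)]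
    rfl

/-- the whole A fold = register every word of the flattened stream, then count every bigram -/
theorem pvStepsFold_eq (ts : List (List String))
    (n : PySem.Dict String (PySem.Dict String Int)) (hnd : n.keys.Nodup) :
    ts.foldl pvSteps n
      = (ts.flatMap (fun l => l.zip l.tail)).foldl pvIncP
          ((ts.flatMap (fun l => l)).foldl pvReg n) := by
  induction ts generalizing n with
  | nil => rfl
  | cons lst ts ih =>
    simp only [List.foldl_cons, List.flatMap_cons]
    rw [ih (pvSteps n lst) (pvNodup_steps lst n hnd), ← pvSteps_eq lst n hnd,
      List.foldl_append, List.foldl_append,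
      pvIncFold_regFold_comm (lst.zip lst.tail) _ (lst.foldl pvReg n)
        (pvNodup_regFold lst n hnd)
        (fun q hq => pvContains_regFold lst n q.1 (Or.inl (List.of_mem_zip hq).1))]

/-- A's enumerate pass over a suffix, indices offset by the prefix length -/
theorem pvA_enum (l pre : List String) (n : PySem.Dict String (PySem.Dict String Int)) :
    (PySem.List.enumerate l (pre.length : Int)).foldl (pvBody (pre ++ l)) n = pvSteps n l := by
  induction l generalizing pre n with
  | nil => rw [PySem.List.enumerate_nil]; rfl
  | cons w r ih =>
    rw [PySem.List.enumerate_cons, List.foldl_cons]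
    cases r with
    | nil =>
      have hbody : pvBody (pre ++ [w]) n ((pre.length : Int), w) = pvReg n w := by
        simp only [pvBody]
        rw [if_neg (by simp)]
        rfl
      rw [hbody, PySem.List.enumerate_nil, List.foldl_nil]
      rfl
    | cons b r' =>
      have hget : PySem.List.pyGet? (pre ++ w :: b :: r') ((pre.length : Int) + 1)
          = some b := by
        have h1 : (pre.length : Int) + 1 = ((pre.length + 1 : Nat) : Int) := by push_cast; ring
        rw [h1, PySem.List.pyGet?_natCast, List.getElem?_append_right (by omega)]
        simp
      have hbody : pvBody (pre ++ w :: b :: r') n ((pre.length : Int), w)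
          = pvInc (pvReg n w) w b := by
        simp only [pvBody]
        rw [if_pos (by simp only [List.length_append, List.length_cons]; push_cast; omega), hget]
        rfl
      rw [hbody]
      have h2 : ((pre.length : Int) + 1) = (((pre ++ [w]).length : Nat) : Int) := by
        simp
      have h3 : pre ++ w :: b :: r' = (pre ++ [w]) ++ (b :: r') := by simp
      rw [h2, h3]
      exact ih (pre ++ [w]) (pvInc (pvReg n w) w b)

/-- two inserts at distinct keys commute when the first key is already present -/
theorem pvInsert_comm {ν : Type} (d : PySem.Dict String ν) (k k' : String) (v v' : ν)
    (hk : d.contains k = true) (hne : k' ≠ k) :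
    (d.insert k' v').insert k v = (d.insert k v).insert k' v' := by
  apply PySem.Dict.ext
  by_cases hk' : d.contains k' = true
  · have c1 : (d.insert k' v').contains k = true := by
      rw [PySem.Dict.contains_insert]; simp [hk]
    have c2 : (d.insert k v).contains k' = true := by
      rw [PySem.Dict.contains_insert]; simp [hk']
    rw [PySem.Dict.items_insert_of_contains _ _ c1,
      PySem.Dict.items_insert_of_contains _ _ hk',
      PySem.Dict.items_insert_of_contains _ _ c2,
      PySem.Dict.items_insert_of_contains _ _ hk,
      List.map_map, List.map_map]
    apply List.map_congr_left
    intro p _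
    by_cases hpk : p.1 = k
    · simp [Function.comp, hpk, Ne.symm hne]
    · by_cases hpk' : p.1 = k'
      · simp [Function.comp, hpk', hne]
      · simp [Function.comp, hpk, hpk']
  · have hk'f : d.contains k' = false := by simpa using hk'
    have c1 : (d.insert k' v').contains k = true := by
      rw [PySem.Dict.contains_insert]; simp [hk]
    have c2 : (d.insert k v).contains k' = false := by
      rw [PySem.Dict.contains_insert]; simp [hk'f, hne]
    rw [PySem.Dict.items_insert_of_contains _ _ c1,
      PySem.Dict.items_insert_of_not_contains _ _ hk'f,
      PySem.Dict.items_insert_of_not_contains _ _ c2,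
      PySem.Dict.items_insert_of_contains _ _ hk,
      List.map_append]
    simp [hne]

/-- an inner tally already present survives any counting step -/
theorem pvInnerContains_inc (m : PySem.Dict String (PySem.Dict String Int))
    (q p : String × String)
    (h : ((m.getD p.1 PySem.Dict.empty).contains p.2) = true) :
    (((pvIncP m q).getD p.1 PySem.Dict.empty).contains p.2) = true := by
  by_cases ha : p.1 = q.1
  · rw [pvIncP, pvInc, ha, PySem.Dict.getD_insert_self, PySem.Dict.contains_insert]
    rw [← ha] at *
    simp [h]
  · rw [pvIncP, pvInc, PySem.Dict.getD_insert_of_ne _ _ _ ha]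
    exact h

/-- counting steps for two different bigrams commute once p's tally is present -/
theorem pvInc_inc_comm (m : PySem.Dict String (PySem.Dict String Int))
    (p q : String × String) (hne : q ≠ p)
    (hcp : m.contains p.1 = true) (hcq : m.contains q.1 = true)
    (hin : ((m.getD p.1 PySem.Dict.empty).contains p.2) = true) :
    pvIncP (pvIncP m q) p = pvIncP (pvIncP m p) q := by
  by_cases ha : q.1 = p.1
  · have hb : q.2 ≠ p.2 := by
      intro h; exact hne (Prod.ext ha h)
    obtain ⟨a, b⟩ := q
    obtain ⟨a', c⟩ := p
    simp only at ha hb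
    subst ha
    simp only [pvIncP, pvInc, PySem.Dict.getD_insert_self, PySem.Dict.insert_insert_self,
      PySem.Dict.getD_insert_of_ne _ _ _ hb, PySem.Dict.getD_insert_of_ne _ _ _ (Ne.symm hb)]
    exact congrArg _ (pvInsert_comm _ _ _ _ _ hin hb)
  · simp only [pvIncP, pvInc,
      PySem.Dict.getD_insert_of_ne _ _ _ (Ne.symm ha),
      PySem.Dict.getD_insert_of_ne _ _ _ ha]
    exact pvInsert_comm _ _ _ _ _ hcp ha

/-- k repeated counting steps at one bigram -/
def pvIncIter (m : PySem.Dict String (PySem.Dict String Int)) (p : String × String)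
    (k : Nat) : PySem.Dict String (PySem.Dict String Int) :=
  (fun s => pvIncP s p)^[k] m

theorem pvIncIter_inc_comm (p q : String × String) (hne : q ≠ p) (k : Nat) :
    ∀ (m : PySem.Dict String (PySem.Dict String Int)), m.contains p.1 = true →
    m.contains q.1 = true → ((m.getD p.1 PySem.Dict.empty).contains p.2) = true →
    pvIncIter (pvIncP m q) p k = pvIncP (pvIncIter m p k) q := by
  induction k with
  | zero => intro m _ _ _; rfl
  | succ k ih =>
    intro m hcp hcq hin
    rw [pvIncIter, Function.iterate_succ_apply, ← pvIncIter,
      pvInc_inc_comm m p q hne hcp hcq hin,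
      ih (pvIncP m p) (pvContains_inc m p.1 p.2 p.1 hcp) (pvContains_inc m p.1 p.2 q.1 hcq)
        (pvInnerContains_inc m p p hin),
      pvIncIter, ← Function.iterate_succ_apply, ← pvIncIter]

/-- pull every later occurrence of bigram p forward, once its tally is present -/
theorem pvPull (p : String × String) (Q : List (String × String)) :
    ∀ (m : PySem.Dict String (PySem.Dict String Int)), m.contains p.1 = true →
    ((m.getD p.1 PySem.Dict.empty).contains p.2) = true →
    (∀ q ∈ Q, m.contains q.1 = true) →
    Q.foldl pvIncP m
      = (Q.filter (fun q => !(q == p))).foldl pvIncP (pvIncIter m p (Q.count p)) := by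
  induction Q with
  | nil => intro m _ _ _; rfl
  | cons q Q ih =>
    intro m hcp hin hc
    by_cases hq : q = p
    · subst hq
      rw [List.foldl_cons,
        ih (pvIncP m q) (pvContains_inc m q.1 q.2 q.1 hcp)
          (pvInnerContains_inc m q q hin)
          (fun r hr => pvContains_inc m q.1 q.2 r.1 (hc r (List.mem_cons_of_mem q hr)))]
      have hfilter : (q :: Q).filter (fun r => !(r == q)) = Q.filter (fun r => !(r == q)) := by
        simp
      have hcount : (q :: Q).count q = Q.count q + 1 := by simp
      rw [hfilter, hcount]
      simp only [pvIncIter, Function.iterate_succ_apply]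
    · have hne : q ≠ p := hq
      rw [List.foldl_cons,
        ih (pvIncP m q) (pvContains_inc m q.1 q.2 p.1 hcp)
          (pvInnerContains_inc m q p hin)
          (fun r hr => pvContains_inc m q.1 q.2 r.1 (hc r (List.mem_cons_of_mem q hr))),
        pvIncIter_inc_comm p q hne (Q.count p) m hcp (hc q List.mem_cons_self) hin]
      have hfilter : (q :: Q).filter (fun r => !(r == p)) = q :: Q.filter (fun r => !(r == p)) := by
        simp [hne]
      have hcount : (q :: Q).count p = Q.count p := List.count_cons_of_ne hne
      rw [hfilter, hcount, List.foldl_cons]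

/-- a fresh first count is a plain set-to-1 -/
theorem pvInc_fresh (m : PySem.Dict String (PySem.Dict String Int)) (p : String × String)
    (h : ((m.getD p.1 PySem.Dict.empty).contains p.2) = false) :
    pvIncP m p = pvSet m p 1 := by
  rw [pvIncP, pvInc, pvSet, PySem.Dict.getD_of_not_contains _ _ h]
  norm_num

/-- k more counts on a freshly set tally just add k -/
theorem pvIncIter_set (m : PySem.Dict String (PySem.Dict String Int)) (p : String × String)
    (k : Nat) : ∀ (c : Int), pvIncIter (pvSet m p c) p k = pvSet m p (c + k) := by
  induction k with
  | zero => intro c; simp [pvIncIter]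
  | succ k ih =>
    intro c
    have hstep : pvIncP (pvSet m p c) p = pvSet m p (c + 1) := by
      rw [pvIncP, pvInc, pvSet, pvSet, PySem.Dict.getD_insert_self,
        PySem.Dict.getD_insert_self, PySem.Dict.insert_insert_self,
        PySem.Dict.insert_insert_self]
    rw [pvIncIter, Function.iterate_succ_apply, ← pvIncIter, hstep, ih (c + 1)]
    congr 1
    push_cast
    ring

/-- dedup commutes with filtering -/
theorem pvOfList_filter (f : String × String → Bool) (Q : List (String × String)) :
    PySem.Set.ofList (Q.filter f) = (PySem.Set.ofList Q).filter f := by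
  induction Q with
  | nil => rfl
  | cons q Q ih =>
    by_cases hf : f q = true
    · rw [List.filter_cons_of_pos hf, PySem.Set.ofList_cons, PySem.Set.ofList_cons,
        List.filter_cons_of_pos hf, ih]
      congr 1
      show PySem.Set.discard ((PySem.Set.ofList Q).filter f) q
        = ((PySem.Set.discard (PySem.Set.ofList Q) q).filter f : List (String × String))
      simp only [PySem.Set.discard, List.filter_filter]
      exact List.filter_congr (fun a _ => Bool.and_comm _ _)
    · have hf' : f q = false := by simpa using hf
      rw [List.filter_cons_of_neg (by simp [hf']), PySem.Set.ofList_cons, ih,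
        List.filter_cons_of_neg (by simp [hf'])]
      show ((PySem.Set.ofList Q).filter f : List (String × String))
        = (PySem.Set.discard (PySem.Set.ofList Q) q).filter f
      simp only [PySem.Set.discard, List.filter_filter]
      refine (List.filter_congr ?_).symm
      intro a _
      by_cases ha : a = q
      · subst ha; simp [hf']
      · simp [ha]

/-- counting every bigram one by one = setting each distinct bigram to its total count,
    in first-occurrence order, starting from a state whose tallies are all absent -/
theorem pvGrouped (k : Nat) : ∀ (P : List (String × String))
    (n : PySem.Dict String (PySem.Dict String Int)), P.length ≤ k →
    (∀ q ∈ P, n.contains q.1 = true) →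
    (∀ q ∈ P, ((n.getD q.1 PySem.Dict.empty).contains q.2) = false) →
    P.foldl pvIncP n
      = (PySem.Set.ofList P).foldl (fun s r => pvSet s r ((P.count r : Nat) : Int)) n := by
  induction k with
  | zero =>
    intro P n hlen _ _
    rw [List.length_eq_zero_iff.mp (Nat.le_zero.mp hlen)]
    rfl
  | succ k ih =>
    intro P n hlen hc hf
    cases P with
    | nil => rfl
    | cons p Q =>
      rw [List.foldl_cons, pvInc_fresh n p (hf p List.mem_cons_self),
        pvPull p Q (pvSet n p 1)
          (PySem.Dict.contains_insert_self _ _ _)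
          (by rw [pvSet, PySem.Dict.getD_insert_self]
              exact PySem.Dict.contains_insert_self _ _ _)
          (fun r hr => by
            rw [pvSet, PySem.Dict.contains_insert]
            simp [hc r (List.mem_cons_of_mem p hr)]),
        pvIncIter_set n p (Q.count p) 1]
      have hlen' : (Q.filter (fun q => !(q == p))).length ≤ k :=
        le_trans (List.length_filter_le _ _) (Nat.le_of_succ_le_succ hlen)
      rw [ih (Q.filter (fun q => !(q == p))) (pvSet n p (1 + (Q.count p : Int))) hlen'
          (fun r hr => by
            rw [pvSet, PySem.Dict.contains_insert]
            simp [hc r (List.mem_cons_of_mem p (List.mem_of_mem_filter hr))])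
          (fun r hr => by
            have hrQ : r ∈ Q := List.mem_of_mem_filter hr
            have hrp : r ≠ p := by
              have := List.of_mem_filter hr
              simpa using this
            by_cases ha : r.1 = p.1
            · have hb : r.2 ≠ p.2 := by
                intro h; exact hrp (Prod.ext ha h)
              rw [pvSet, ha, PySem.Dict.getD_insert_self, PySem.Dict.contains_insert]
              have := hf r (List.mem_cons_of_mem p hrQ)
              rw [ha] at this
              simp [hb, this]
            · rw [pvSet, PySem.Dict.getD_insert_of_ne _ _ _ ha]
              exact hf r (List.mem_cons_of_mem p hrQ))]
      rw [pvOfList_filter, PySem.Set.ofList_cons, List.foldl_cons]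
      have hstate : pvSet n p (1 + (Q.count p : Int))
          = pvSet n p (((p :: Q).count p : Nat) : Int) := by
        rw [List.count_cons_self]
        congr 1
        push_cast
        ring
      rw [hstate]
      have hdis : PySem.Set.discard (PySem.Set.ofList Q) p
          = (PySem.Set.ofList Q).filter (fun q => !(q == p)) := by
        simp [PySem.Set.discard]
      rw [← hdis]
      apply PySem.List.foldl_congr_mem
      intro s r hr
      have hmem := (PySem.Set.mem_discard (PySem.Set.ofList Q) p r).mp hr
      have hrp : r ≠ p := hmem.2
      congr 1
      rw [List.count_filter (by simp [hrp]), List.count_cons_of_ne (Ne.symm hrp)]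

/-- registering into a dict whose inner dicts are all empty is a plain insert of {} -/
theorem pvInsertEmptyFold (ws : List String) (n : PySem.Dict String (PySem.Dict String Int))
    (h : ∀ k, n.getD k PySem.Dict.empty = PySem.Dict.empty) :
    ws.foldl (fun n w => n.insert w PySem.Dict.empty) n = ws.foldl pvReg n := by
  induction ws generalizing n with
  | nil => rfl
  | cons w ws ih =>
    simp only [List.foldl_cons]
    rw [show pvReg n w = n.insert w PySem.Dict.empty by rw [pvReg, h w]]
    refine ih (n.insert w PySem.Dict.empty) (fun k => ?_)
    rw [PySem.Dict.getD_insert]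
    split_ifs with hk
    · rfl
    · exact h k

/-- a pure registration pass keeps every inner dict empty -/
theorem pvRegFold_inner_empty (ws : List String) (n : PySem.Dict String (PySem.Dict String Int))
    (h : ∀ k, n.getD k PySem.Dict.empty = PySem.Dict.empty) :
    ∀ k, (ws.foldl pvReg n).getD k PySem.Dict.empty = PySem.Dict.empty := by
  induction ws generalizing n with
  | nil => exact h
  | cons w ws ih =>
    simp only [List.foldl_cons]
    refine ih (pvReg n w) (fun k => ?_)
    rw [pvReg, PySem.Dict.getD_insert]
    split_ifs with hk
    · exact h w
    · exact h k

/-- A's outer loop, with each enumerate pass folded into the structural per-list pass -/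
theorem pvAFold (ts : List (List String)) (n : PySem.Dict String (PySem.Dict String Int)) :
    ts.foldl (fun network lst =>
        (PySem.List.enumerate lst).foldl (pvBody lst) network) n
      = ts.foldl pvSteps n := by
  induction ts generalizing n with
  | nil => rfl
  | cons lst ts ih =>
    simp only [List.foldl_cons]
    rw [show (PySem.List.enumerate lst).foldl (pvBody lst) n = pvSteps n lst from by
      simpa using pvA_enum lst [] n]
    exact ih (pvSteps n lst)

/-- the two dicts built by A and by B coincide -/
theorem pvMain (ts : List (List String)) :
    ts.foldl (fun network lst =>
        (PySem.List.enumerate lst).foldl (pvBody lst) network) PySem.Dict.empty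
    = (let words : List String := ts.flatMap (fun lst => lst)
       let pairs : List (String × String) := ts.flatMap (fun lst => lst.zip lst.tail)
       let counts : PySem.Dict (String × String) Int :=
         pairs.foldl (fun c p => c.insert p (c.getD p 0 + 1)) PySem.Dict.empty
       let network : PySem.Dict String (PySem.Dict String Int) :=
         words.foldl (fun n w => n.insert w PySem.Dict.empty) PySem.Dict.empty
       counts.keys.foldl (fun n ab =>
         n.insert ab.1 ((n.getD ab.1 PySem.Dict.empty).insert ab.2 (counts.getD ab 0)))
         network) := by
  have hwb : (ts.flatMap (fun lst => lst)).foldl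
        (fun n w => n.insert w PySem.Dict.empty) PySem.Dict.empty
      = (ts.flatMap (fun lst => lst)).foldl pvReg PySem.Dict.empty :=
    pvInsertEmptyFold _ _ (fun k => PySem.Dict.getD_empty k PySem.Dict.empty)
  have hinner := pvRegFold_inner_empty (ts.flatMap (fun lst => lst)) PySem.Dict.empty
    (fun k => PySem.Dict.getD_empty k PySem.Dict.empty)
  have hc : ∀ q ∈ ts.flatMap (fun lst => lst.zip lst.tail),
      ((ts.flatMap (fun lst => lst)).foldl pvReg PySem.Dict.empty).contains q.1 = true := by
    rintro ⟨x, y⟩ hq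
    obtain ⟨l, hl, hql⟩ := List.mem_flatMap.mp hq
    exact pvContains_regFold _ _ _
      (Or.inl (List.mem_flatMap.mpr ⟨l, hl, (List.of_mem_zip hql).1⟩))
  have hf : ∀ q ∈ ts.flatMap (fun lst => lst.zip lst.tail),
      ((((ts.flatMap (fun lst => lst)).foldl pvReg PySem.Dict.empty).getD q.1
        PySem.Dict.empty).contains q.2) = false := by
    intro q _
    rw [hinner q.1]
    exact PySem.Dict.contains_empty q.2
  show ts.foldl (fun network lst =>
        (PySem.List.enumerate lst).foldl (pvBody lst) network) PySem.Dict.empty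
    = (PySem.Dict.counter (ts.flatMap (fun lst => lst.zip lst.tail))).keys.foldl
        (fun n ab => n.insert ab.1 ((n.getD ab.1 PySem.Dict.empty).insert ab.2
          ((PySem.Dict.counter (ts.flatMap (fun lst => lst.zip lst.tail))).getD ab 0)))
        ((ts.flatMap (fun lst => lst)).foldl
          (fun n w => n.insert w PySem.Dict.empty) PySem.Dict.empty)
  rw [pvAFold ts PySem.Dict.empty,
    pvStepsFold_eq ts PySem.Dict.empty PySem.Dict.nodup_keys_empty,
    pvGrouped (ts.flatMap (fun lst => lst.zip lst.tail)).length _ _ le_rfl hc hf,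
    hwb, PySem.Dict.keys_counter]
  apply PySem.List.foldl_congr_mem
  intro s r _
  rw [PySem.Dict.getD_counter]
  rfl

-- ===== VERDICT (by name: the statement is the Claim_ definition above) =====
theorem network_dict_spec : Claim_equal_network_dict := by
  intro ts _
  unfold Spec_network_dict network_dict network_dict_alt
  simp only [PySem.List.slice_from_one]
  exact congrArg
    (fun d : PySem.Dict String (PySem.Dict String Int) => d.items.map (fun p => (p.1, p.2.items)))
    (pvMain ts)
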